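-- pv_equiv track=rewrite | github.com/konsatanasoff/python-advanced-january-2021 | comprehensions/exercises/number_classification.py | num_type_check
-- ===== SOURCE A (Python) =====
-- def num_type_check(numbers):
--     data = {"Positive": [],
--             "Negative": [],
--             "Even": [],
--             "Odd": [],
--             }
--     for number in numbers:
--         if number >= 0:
--             data["Positive"].append(number)
--         if number < 0:
--             data["Negative"].append(number)
--         if number % 2 == 0:
--             data["Even"].append(number)
--         if number % 2 == 1:
--             data["Odd"].append(number)
--     return data
-- ===== SOURCE B (Python) =====
-- def num_type_check(numbers):
--     numbers = list(numbers)
--     # Stable sort by a two-valued key puts one class (in original order)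
--     # before the other; splitting at the class boundary yields the buckets.
--     by_sign = sorted(numbers, key=lambda n: n < 0)   # non-negatives first
--     by_par = sorted(numbers, key=lambda n: n % 2)    # evens first
--     k = len(numbers) - sum(n < 0 for n in numbers)
--     m = len(numbers) - sum(n % 2 for n in numbers)
--     return {"Positive": by_sign[:k], "Negative": by_sign[k:],
--             "Even": by_par[:m], "Odd": by_par[m:]}
-- ===== Notes on version B (the rewrite author's own statement) =====
-- stated objective: alternative
-- what changed: Replaces the append-into-buckets pass with sort-then-split: two stable sorts by a two-valued key (sign, parity) and a split of each sorted list at the counted class boundary; correctness rests on stability of Python's sort.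
import Mathlib
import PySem

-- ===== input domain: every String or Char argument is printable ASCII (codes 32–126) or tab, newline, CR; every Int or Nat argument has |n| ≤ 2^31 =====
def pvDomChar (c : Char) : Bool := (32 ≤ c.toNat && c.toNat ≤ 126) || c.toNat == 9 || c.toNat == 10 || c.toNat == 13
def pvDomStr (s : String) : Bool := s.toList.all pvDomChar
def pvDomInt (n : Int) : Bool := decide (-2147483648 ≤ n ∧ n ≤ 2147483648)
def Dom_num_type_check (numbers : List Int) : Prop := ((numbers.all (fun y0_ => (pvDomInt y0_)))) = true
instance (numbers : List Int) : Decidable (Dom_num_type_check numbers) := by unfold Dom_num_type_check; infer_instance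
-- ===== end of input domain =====

-- B replaces the append-into-buckets pass with sort-then-split: two stable sorts by a
-- two-valued key and a split of each sorted list at the counted class boundary.

-- ===== PORT A =====
-- A builds a dict of four empty buckets and appends into them in one pass;
-- the dict's keys are the fixed literals in fixed insertion order, so the state is the 4-tuple of buckets.
def num_type_check (numbers : List Int) : List (String × List Int) :=
  let s := numbers.foldl (fun (d : List Int × List Int × List Int × List Int) number =>
    ((if number ≥ 0 then d.1 ++ [number] else d.1),
     (if number < 0 then d.2.1 ++ [number] else d.2.1),
     (if PySem.Int.mod number 2 = 0 then d.2.2.1 ++ [number] else d.2.2.1),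
     (if PySem.Int.mod number 2 = 1 then d.2.2.2 ++ [number] else d.2.2.2))) ([], [], [], [])
  [("Positive", s.1), ("Negative", s.2.1), ("Even", s.2.2.1), ("Odd", s.2.2.2)]

-- ===== PORT B =====
-- sort-then-split: Bool keys sort False (non-negative / even) before True, stably.
def num_type_check_alt (numbers : List Int) : List (String × List Int) :=
  let bySign := PySem.List.sorted numbers (fun n => decide (n < 0))
  let byPar := PySem.List.sorted numbers (fun n => PySem.Int.mod n 2)
  let k : Int := (numbers.length : Int) - (numbers.map (fun n => if n < 0 then (1:Int) else 0)).sum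
  let m : Int := (numbers.length : Int) - (numbers.map (fun n => PySem.Int.mod n 2)).sum
  [("Positive", PySem.List.slice bySign none (some k)),
   ("Negative", PySem.List.slice bySign (some k) none),
   ("Even", PySem.List.slice byPar none (some m)),
   ("Odd", PySem.List.slice byPar (some m) none)]

-- ===== PRECONDITION & SPEC =====
def Spec_num_type_check (numbers : List Int) (out : List (String × List Int)) : Prop := out = num_type_check_alt numbers
instance (numbers : List Int) (out : List (String × List Int)) : Decidable (Spec_num_type_check numbers out) := by unfold Spec_num_type_check; infer_instance

-- ===== CLAIM (what is proved, stated in full; the proofs are below) =====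
def Claim_equal_num_type_check : Prop := ∀ (numbers : List Int), Dom_num_type_check numbers → Spec_num_type_check numbers (num_type_check numbers)

-- ===== LEMMAS AND PROOFS =====

-- A's single pass produces the four filters.
theorem num_type_check_fold (numbers : List Int) (p n e o : List Int) :
    numbers.foldl (fun (d : List Int × List Int × List Int × List Int) number =>
      ((if number ≥ 0 then d.1 ++ [number] else d.1),
       (if number < 0 then d.2.1 ++ [number] else d.2.1),
       (if PySem.Int.mod number 2 = 0 then d.2.2.1 ++ [number] else d.2.2.1),
       (if PySem.Int.mod number 2 = 1 then d.2.2.2 ++ [number] else d.2.2.2))) (p, n, e, o)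
    = (p ++ numbers.filter (fun x => x ≥ 0),
       n ++ numbers.filter (fun x => x < 0),
       e ++ numbers.filter (fun x => PySem.Int.mod x 2 = 0),
       o ++ numbers.filter (fun x => PySem.Int.mod x 2 = 1)) := by
  induction numbers generalizing p n e o with
  | nil => simp
  | cons x xs ih =>
    simp only [List.foldl_cons, List.filter_cons]
    rw [ih]
    simp only [decide_eq_true_eq]
    split_ifs <;> simp

-- Inserting x into A ++ B lands exactly between them when x goes after all of A and before all of B.
theorem insertBy_middle {α : Type} (before : α → α → Bool) (x : α) (A B : List α)
    (hA : ∀ y ∈ A, before x y = false) (hB : ∀ y ∈ B, before x y = true) :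
    PySem.List.insertBy before x (A ++ B) = A ++ x :: B := by
  induction A with
  | nil =>
    cases B with
    | nil => simp [PySem.List.insertBy]
    | cons c B' => simp [PySem.List.insertBy, hB c (by simp)]
  | cons d A' ih =>
    have hd := hA d (by simp)
    simp only [List.cons_append, PySem.List.insertBy, hd, Bool.false_eq_true, if_false]
    exact congrArg (d :: ·) (ih (fun y hy => hA y (by simp [hy])))

-- Invariant of the insertion-sort fold for a two-valued key.
theorem two_key_foldl {α κ : Type} [LinearOrder κ] (key : α → κ) (a b : κ) (hab : a < b)
    (hdi : ∀ x, key x = a ∨ key x = b) (xs : List α) :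
    ∀ A B : List α, (∀ y ∈ A, key y = a) → (∀ y ∈ B, key y = b) →
    xs.foldl (fun acc x => PySem.List.insertBy (fun u v => decide (key u < key v)) x acc) (A ++ B)
      = (A ++ xs.filter (fun x => key x = a)) ++ (B ++ xs.filter (fun x => key x = b)) := by
  induction xs with
  | nil => intro A B _ _; simp
  | cons x xs ih =>
    intro A B hA hB
    simp only [List.foldl_cons, List.filter_cons]
    rcases hdi x with hx | hx
    · have hstep : PySem.List.insertBy (fun u v => decide (key u < key v)) x (A ++ B)
          = (A ++ [x]) ++ B := by
        rw [insertBy_middle _ _ A B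
          (fun y hy => by simp [hA y hy, hx])
          (fun y hy => by simp [hB y hy, hx, hab])]
        simp
      rw [hstep, ih (A ++ [x]) B
        (by intro y hy; rcases List.mem_append.1 hy with h | h
            · exact hA y h
            · simp at h; simpa [h] using hx) hB]
      simp [hx]
      exact ne_of_lt hab
    · have hstep : PySem.List.insertBy (fun u v => decide (key u < key v)) x (A ++ B)
          = A ++ (B ++ [x]) := by
        rw [PySem.List.insertBy_of_forall_not_before _ _ _
          (fun y hy => by
            rcases List.mem_append.1 hy with h | h
            · simp [hA y h, hx, le_of_lt hab]
            · simp [hB y h, hx])]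
        simp
      rw [hstep, ih A (B ++ [x]) hA
        (by intro y hy; rcases List.mem_append.1 hy with h | h
            · exact hB y h
            · simp at h; simpa [h] using hx)]
      simp [hx]
      exact (ne_of_lt hab).symm

-- A stable sort by a two-valued key is the low-key filter followed by the high-key filter.
theorem two_key_sorted {α κ : Type} [LinearOrder κ] (key : α → κ) (a b : κ) (hab : a < b)
    (hdi : ∀ x, key x = a ∨ key x = b) (xs : List α) :
    PySem.List.sorted xs key
      = xs.filter (fun x => key x = a) ++ xs.filter (fun x => key x = b) := by
  rw [PySem.List.sorted_eq_foldl_insertBy]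
  simpa using two_key_foldl key a b hab hdi xs [] [] (by simp) (by simp)

theorem mod_two_dichotomy (n : Int) : PySem.Int.mod n 2 = 0 ∨ PySem.Int.mod n 2 = 1 := by
  have h1 := PySem.Int.mod_nonneg n (b := 2) (by norm_num)
  have h2 := PySem.Int.mod_lt n (b := 2) (by norm_num)
  omega

theorem num_type_check_spec : Claim_equal_num_type_check := by
  intro numbers _
  unfold Spec_num_type_check num_type_check num_type_check_alt
  simp only [num_type_check_fold, List.nil_append]
  -- sign sort: key n = decide (n < 0), false before true
  have hsign := two_key_sorted (fun n : Int => decide (n < 0)) false true (by decide)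
    (fun x => by by_cases h : x < 0 <;> simp [h]) numbers
  have hpar := two_key_sorted (fun n : Int => PySem.Int.mod n 2) 0 1 (by norm_num)
    mod_two_dichotomy numbers
  -- the counts
  have hnegsum : (numbers.map (fun n => if n < 0 then (1:Int) else 0)).sum
      = (numbers.countP (fun n => decide (n < 0)) : Int) := by
    simpa using PySem.List.sum_map_ite_one_zero (fun n : Int => decide (n < 0)) numbers
  have hoddsum : (numbers.map (fun n => PySem.Int.mod n 2)).sum
      = (numbers.countP (fun n => decide (PySem.Int.mod n 2 = 1)) : Int) := by
    rw [show (numbers.map (fun n => PySem.Int.mod n 2))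
        = numbers.map (fun n => if PySem.Int.mod n 2 = 1 then (1:Int) else 0) from
      List.map_congr_left (fun x _ => by rcases mod_two_dichotomy x with h | h <;> simp only [h] <;> norm_num)]
    simpa using PySem.List.sum_map_ite_one_zero (fun n : Int => decide (PySem.Int.mod n 2 = 1)) numbers
  -- rewrite the filters of the sorted lists to A's predicates
  have hfsign1 : numbers.filter (fun x => decide ((fun n : Int => decide (n < 0)) x = false))
      = numbers.filter (fun x => x ≥ 0) :=
    List.filter_congr (fun x _ => by by_cases h : x < 0 <;> simp [h]; omega)
  have hfsign2 : numbers.filter (fun x => decide ((fun n : Int => decide (n < 0)) x = true))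
      = numbers.filter (fun x => x < 0) :=
    List.filter_congr (fun x _ => by by_cases h : x < 0 <;> simp [h])
  -- lengths of the low-key filters
  have hlen1 : (numbers.filter (fun x => x ≥ 0)).length
      = numbers.length - numbers.countP (fun n => decide (n < 0)) := by
    have := (List.length_eq_length_filter_add (l := numbers) (fun x : Int => decide (x ≥ 0))).symm
    have he : numbers.filter (fun x => !decide (x ≥ 0)) = numbers.filter (fun n => decide (n < 0)) :=
      List.filter_congr (fun x _ => by by_cases h : x < 0 <;> simp [h]; omega)
    rw [he] at this
    simp only [List.countP_eq_length_filter] at this ⊢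
    omega
  have hlen2 : (numbers.filter (fun x => PySem.Int.mod x 2 = 0)).length
      = numbers.length - numbers.countP (fun n => decide (PySem.Int.mod n 2 = 1)) := by
    have := (List.length_eq_length_filter_add (l := numbers) (fun x : Int => decide (PySem.Int.mod x 2 = 0))).symm
    have he : numbers.filter (fun x => !decide (PySem.Int.mod x 2 = 0))
        = numbers.filter (fun n => decide (PySem.Int.mod n 2 = 1)) :=
      List.filter_congr (fun x _ => by rcases mod_two_dichotomy x with h | h <;> simp only [h] <;> norm_num)
    rw [he] at this
    simp only [List.countP_eq_length_filter] at this ⊢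
    omega
  have hcle1 : numbers.countP (fun n => decide (n < 0)) ≤ numbers.length := List.countP_le_length
  have hcle2 : numbers.countP (fun n => decide (PySem.Int.mod n 2 = 1)) ≤ numbers.length :=
    List.countP_le_length
  rw [hsign, hpar, hnegsum, hoddsum, hfsign1, hfsign2]
  rw [show ((numbers.length : Int) - (numbers.countP (fun n => decide (n < 0)) : Int))
      = ((numbers.length - numbers.countP (fun n => decide (n < 0)) : Nat) : Int) by omega]
  rw [show ((numbers.length : Int) - (numbers.countP (fun n => decide (PySem.Int.mod n 2 = 1)) : Int))
      = ((numbers.length - numbers.countP (fun n => decide (PySem.Int.mod n 2 = 1)) : Nat) : Int) by omega]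
  rw [PySem.List.slice_to_natCast, PySem.List.slice_from_natCast,
      PySem.List.slice_to_natCast, PySem.List.slice_from_natCast]
  rw [← hlen1, ← hlen2]
  simp
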